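-- pv_equiv track=rewrite | github.com/BoothGroup/Vayesta | vayesta/core/util.py | permutations_with_signs
-- ===== SOURCE A (Python) =====
-- def permutations_with_signs(seq):
--     """Generate permutations of seq, yielding also a sign which is
--     equal to +1 for an even number of swaps, and -1 for an odd number
--     of swaps.
--
--     Copied from ebcc.
--     """
--
--     def _permutations(seq):
--         if not seq:
--             return [[]]
--
--         items = []
--         for i, item in enumerate(_permutations(seq[:-1])):
--             inds = range(len(item) + 1)
--             if i % 2 == 0:
--                 inds = reversed(inds)
--             items += [item[:i] + seq[-1:] + item[i:] for i in inds]
--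
--         return items
--
--     return [(item, -1 if i % 2 else 1) for i, item in enumerate(_permutations(list(seq)))]
-- ===== SOURCE B (Python) =====
-- def permutations_with_signs(seq):
--     """Generate permutations of seq with alternating signs, by direct
--     rank-decoding: the i-th permutation in Steinhaus-Johnson-Trotter
--     (plain-changes) order is built from the factorial digits of i."""
--     seq = list(seq)
--     n = len(seq)
--     total = 1
--     for k in range(2, n + 1):
--         total *= k
--
--     def build(i):
--         # factorial digits of i, least-significant (radix 1) first
--         digits = []
--         q = i
--         for k in range(n, 0, -1):
--             q, r = q // k, q % k
--             digits.append(r)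
--         digits.reverse()
--         # insert seq[k-1] into the growing permutation; the direction of
--         # the insertion sweep depends on the parity of the rank so far
--         perm = []
--         q = 0
--         k = 0
--         for r, x in zip(digits, seq):
--             k += 1
--             pos = len(perm) - r if q % 2 == 0 else r
--             perm.insert(pos, x)
--             q = q * k + r
--         return perm
--
--     return [(build(i), 1 if i % 2 == 0 else -1) for i in range(total)]
-- ===== Notes on version B (the rewrite author's own statement) =====
-- stated objective: alternative
-- what changed: Replaces the recursive zigzag-insertion enumeration by direct rank decoding: for each rank i in range(n!) the i-th plain-changes permutation is built from the factorial digits of i, with no recursion and no intermediate lists of permutations.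
import Mathlib
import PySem

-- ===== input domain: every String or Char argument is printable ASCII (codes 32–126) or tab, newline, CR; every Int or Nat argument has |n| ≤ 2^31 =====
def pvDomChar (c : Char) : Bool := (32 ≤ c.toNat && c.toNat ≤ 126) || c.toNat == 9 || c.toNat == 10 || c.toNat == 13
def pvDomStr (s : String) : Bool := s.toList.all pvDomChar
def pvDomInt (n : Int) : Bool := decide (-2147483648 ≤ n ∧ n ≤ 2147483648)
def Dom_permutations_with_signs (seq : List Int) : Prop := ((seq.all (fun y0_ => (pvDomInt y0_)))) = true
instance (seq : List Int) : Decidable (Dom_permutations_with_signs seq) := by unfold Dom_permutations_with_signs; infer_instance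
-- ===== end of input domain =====

-- B re-implements A by rank decoding (factorial digits) instead of recursive zigzag insertion;
-- same value everywhere, similar cost ("alternative", no speed claim).

-- ===== PORT A =====
-- helper: the inner recursive _permutations of A
def pvPermsA (seq : List Int) : List (List Int) :=
  if h : seq = [] then [[]]
  else
    (PySem.List.enumerate (pvPermsA (PySem.List.slice seq none (some (-1)))) 0).foldl
      (fun items p =>
        let inds0 := PySem.List.pyRange 0 ((p.2.length : Int) + 1) 1
        let inds := if PySem.Int.mod p.1 2 == 0 then inds0.reverse else inds0
        items ++ inds.map (fun i =>
          PySem.List.slice p.2 none (some i) ++ PySem.List.slice seq (some (-1)) none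
            ++ PySem.List.slice p.2 (some i) none)) []
termination_by seq.length
decreasing_by
  simp [PySem.List.slice_to_neg_one]
  have : seq.length ≠ 0 := fun hl => h (List.eq_nil_of_length_eq_zero hl)
  omega

def permutations_with_signs (seq : List Int) : List (List Int × Int) :=
  (PySem.List.enumerate (pvPermsA seq) 0).map
    (fun p => (p.2, if PySem.Int.mod p.1 2 != 0 then (-1 : Int) else 1))

-- ===== PORT B =====
-- helper: B's inner build(i) (closes over n and seq as in Source B)
def pvBuild (n : Int) (seq : List Int) (i : Int) : List Int :=
  let dq := (PySem.List.pyRange n 0 (-1)).foldl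
      (fun (st : Int × List Int) k =>
        (PySem.Int.floordiv st.1 k, st.2 ++ [PySem.Int.mod st.1 k])) (i, [])
  let digits := dq.2.reverse
  let fin := (digits.zip seq).foldl
      (fun (st : List Int × Int × Int) rx =>
        let k := st.2.2 + 1
        let pos : Int := if PySem.Int.mod st.2.1 2 == 0 then (st.1.length : Int) - rx.1 else rx.1
        (PySem.List.insert st.1 pos rx.2, (st.2.1 * k + rx.1, k))) ([], 0, 0)
  fin.1

def permutations_with_signs_alt (seq : List Int) : List (List Int × Int) :=
  let n : Int := seq.length
  let total := (PySem.List.pyRange 2 (n + 1) 1).foldl (fun t k => t * k) 1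
  (PySem.List.pyRange 0 total 1).map (fun i =>
    (pvBuild n seq i, if PySem.Int.mod i 2 == 0 then (1 : Int) else -1))

-- ===== PRECONDITION & SPEC =====
def Spec_permutations_with_signs (seq : List Int) (out : List (List Int × Int)) : Prop := out = permutations_with_signs_alt seq
instance (seq : List Int) (out : List (List Int × Int)) : Decidable (Spec_permutations_with_signs seq out) := by unfold Spec_permutations_with_signs; infer_instance

-- ===== CLAIM (what is proved, stated in full; the proofs are below) =====
def Claim_equal_permutations_with_signs : Prop := ∀ (seq : List Int), Dom_permutations_with_signs seq → Spec_permutations_with_signs seq (permutations_with_signs seq)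

-- ===== LEMMAS AND PROOFS =====

-- insertion at a (valid) position, the common mathematical step of both programs
def pvIns (p : Nat) (x : Int) (l : List Int) : List Int := l.take p ++ x :: l.drop p

-- insertion position of the k-th element: sweep direction alternates with the parity of q
def pvPos (q r n : Nat) : Nat := if q % 2 = 0 then n - 1 - r else r

-- the i-th plain-changes permutation of the REVERSED list, by factorial-digit decoding
def pvBld : List Int → Nat → List Int
  | [], _ => []
  | x :: rest, i =>
      let n := rest.length + 1
      pvIns (pvPos (i / n) (i % n) n) x (pvBld rest (i / n))

-- factorial digits [i₁%1-part first … least significant of level n last]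
def pvDigs : Nat → Nat → List Nat
  | 0, _ => []
  | n + 1, i => pvDigs n (i / (n + 1)) ++ [i % (n + 1)]

lemma pvDigs_len (n i : Nat) : (pvDigs n i).length = n := by
  induction n generalizing i with
  | zero => rfl
  | succ n ih => simp [pvDigs, ih]

lemma pvIns_len (p : Nat) (x : Int) (l : List Int) :
    (pvIns p x l).length = l.length + 1 := by
  simp [pvIns]

lemma pvBld_len (ys : List Int) (i : Nat) : (pvBld ys i).length = ys.length := by
  induction ys generalizing i with
  | nil => rfl
  | cons x rest ih =>
      simp only [pvBld]
      rw [pvIns_len, ih]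
      rfl

-- range (m*n) in blocks of n
lemma pvRangeMul (m n : Nat) (f : Nat → List Int) :
    (List.range (m * n)).map f
      = (List.range m).flatMap (fun k => (List.range n).map (fun r => f (k * n + r))) := by
  induction m with
  | zero => simp
  | succ m ih =>
      have : (m + 1) * n = m * n + n := by ring
      rw [this, List.range_add, List.range_succ]
      simp [ih, List.map_map, Function.comp]

lemma pvEnumMapRange (f : Nat → List Int) (m : Nat) :
    PySem.List.enumerate ((List.range m).map f) 0
      = (List.range m).map (fun (k : Nat) => ((k : Int), f k)) := by
  induction m with
  | zero => simp [PySem.List.enumerate_nil]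
  | succ m ih =>
      rw [List.range_succ]
      simp only [List.map_append, PySem.List.enumerate_append, ih]
      simp [PySem.List.enumerate_cons, PySem.List.enumerate_nil]

lemma pvRevRange (n : Nat) :
    (List.range n).reverse = (List.range n).map (fun r => n - 1 - r) := by
  induction n with
  | zero => simp
  | succ n ih =>
      conv_rhs => rw [List.range_succ]
      rw [List.range_succ_eq_map, List.reverse_cons, ← List.map_reverse, ih, List.map_append,
        List.map_map]
      simp
      intro a _
      omega

lemma pvModTwo (q : Nat) : (PySem.Int.mod (q : Int) 2 == 0) = (q % 2 == 0) := by
  have h : PySem.Int.mod (q : Int) 2 = ((q % 2 : Nat) : Int) := by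
    exact_mod_cast PySem.Int.mod_natCast q 2
  rw [h]
  rcases Nat.mod_two_eq_zero_or_one q with h2 | h2 <;> simp [h2]

lemma pvRange01 (n : Nat) :
    PySem.List.pyRange 0 ((n : Int) + 1) 1 = (List.range (n + 1)).map (fun (j : Nat) => (j : Int)) := by
  rw [PySem.List.pyRange_one]
  have : (((n : Int) + 1) - 0).toNat = n + 1 := by omega
  rw [this]
  simp

-- A's recursion equals rank decoding
lemma pvMainA (xs : List Int) :
    pvPermsA xs = (List.range (Nat.factorial xs.length)).map (fun i => pvBld xs.reverse i) := by
  induction xs using List.reverseRecOn with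
  | nil =>
      rw [pvPermsA]
      simp [pvBld]
  | append_singleton xs x ih =>
      rw [pvPermsA.eq_def]
      rw [dif_neg (by simp)]
      have hsl : PySem.List.slice (xs ++ [x]) none (some (-1)) = xs := by
        rw [PySem.List.slice_to_neg_one]; simp
      have hx : PySem.List.slice (xs ++ [x]) (some (-1)) none = [x] := by
        rw [PySem.List.slice_from_neg_one]
        simp
      rw [hsl, ih, pvEnumMapRange, PySem.List.foldl_append_eq_flatMap, List.nil_append,
        List.flatMap_map]
      simp only [hx, List.reverse_append, List.reverse_cons, List.reverse_nil, List.nil_append,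
        List.singleton_append, List.length_append, List.length_cons, List.length_nil,
        Nat.zero_add]
      rw [Nat.factorial_succ, Nat.mul_comm, pvRangeMul]
      congr 1
      funext k
      show (let inds0 := PySem.List.pyRange 0 (((pvBld xs.reverse k).length : Int) + 1) 1
            let inds := if PySem.Int.mod (k : Int) 2 == 0 then inds0.reverse else inds0
            inds.map (fun i =>
              PySem.List.slice (pvBld xs.reverse k) none (some i) ++ [x]
                ++ PySem.List.slice (pvBld xs.reverse k) (some i) none))
          = (List.range (xs.length + 1)).map
              (fun r => pvBld (x :: xs.reverse) (k * (xs.length + 1) + r))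
      simp only []
      have hlen : (pvBld xs.reverse k).length = xs.length := by
        rw [pvBld_len, List.length_reverse]
      rw [hlen, pvRange01, pvModTwo]
      by_cases hk : k % 2 = 0
      · rw [if_pos (by simp [hk]), ← List.map_reverse, pvRevRange, List.map_map, List.map_map]
        apply List.map_congr_left
        intro r hr
        rw [List.mem_range] at hr
        simp only [Function.comp]
        have e1 : xs.length + 1 - 1 - r = xs.length - r := by omega
        have hq : (k * (xs.length + 1) + r) / (xs.length + 1) = k := by
          rw [Nat.add_comm, Nat.mul_comm, Nat.add_mul_div_left _ _ (by omega),
            Nat.div_eq_of_lt hr, Nat.zero_add]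
        have hm : (k * (xs.length + 1) + r) % (xs.length + 1) = r := by
          rw [Nat.add_comm, Nat.mul_comm, Nat.add_mul_mod_self_left, Nat.mod_eq_of_lt hr]
        rw [e1, PySem.List.slice_to_natCast, PySem.List.slice_from_natCast]
        simp only [pvBld, List.length_reverse, hq, hm]
        unfold pvIns pvPos
        simp [hk]
      · rw [if_neg (by simp [hk]), List.map_map]
        apply List.map_congr_left
        intro r hr
        rw [List.mem_range] at hr
        simp only [Function.comp]
        have hq : (k * (xs.length + 1) + r) / (xs.length + 1) = k := by
          rw [Nat.add_comm, Nat.mul_comm, Nat.add_mul_div_left _ _ (by omega),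
            Nat.div_eq_of_lt hr, Nat.zero_add]
        have hm : (k * (xs.length + 1) + r) % (xs.length + 1) = r := by
          rw [Nat.add_comm, Nat.mul_comm, Nat.add_mul_mod_self_left, Nat.mod_eq_of_lt hr]
        rw [PySem.List.slice_to_natCast, PySem.List.slice_from_natCast]
        simp only [pvBld, List.length_reverse, hq, hm]
        unfold pvIns pvPos
        simp [hk]

-- B's digit loop computes pvDigs
lemma pvDigitsLoop (n i : Nat) (acc : List Int) :
    ((PySem.List.pyRange (n : Int) 0 (-1)).foldl
      (fun (st : Int × List Int) k =>
        (PySem.Int.floordiv st.1 k, st.2 ++ [PySem.Int.mod st.1 k])) ((i : Int), acc)).2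
      = acc ++ ((pvDigs n i).reverse.map (fun (r : Nat) => (r : Int))) := by
  induction n generalizing i acc with
  | zero => rw [PySem.List.pyRange_neg_one_eq_nil (by norm_num)]; simp [pvDigs]
  | succ n ih =>
      rw [PySem.List.pyRange_neg_one_cons (by positivity)]
      simp only [List.foldl_cons]
      rw [show ((((n:Nat)+1 : Nat) : Int) - 1) = (n : Int) by push_cast; ring]
      simp only [PySem.Int.floordiv_natCast, PySem.Int.mod_natCast, ih]
      simp [pvDigs, List.append_assoc]

-- B's zip loop builds pvBld and reconstructs the rank
lemma pvZipLoop (seq : List Int) (i : Nat) (hi : i < Nat.factorial seq.length) :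
    (((pvDigs seq.length i).map (fun (r : Nat) => (r : Int))).zip seq).foldl
      (fun (st : List Int × Int × Int) rx =>
        let k := st.2.2 + 1
        let pos : Int := if PySem.Int.mod st.2.1 2 == 0 then (st.1.length : Int) - rx.1 else rx.1
        (PySem.List.insert st.1 pos rx.2, (st.2.1 * k + rx.1, k))) ([], 0, 0)
      = (pvBld seq.reverse i, ((i : Int), (seq.length : Int))) := by
  induction seq using List.reverseRecOn generalizing i with
  | nil =>
      simp [pvDigs, pvBld] at hi ⊢
      omega
  | append_singleton xs x ih =>
      simp only [List.length_append, List.length_cons, List.length_nil, Nat.zero_add]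
      have hdig : pvDigs (xs.length + 1) i
          = pvDigs xs.length (i / (xs.length + 1)) ++ [i % (xs.length + 1)] := rfl
      rw [hdig, List.map_append, List.zip_append (by simp [pvDigs_len]), List.foldl_append]
      have hi' : i / (xs.length + 1) < Nat.factorial xs.length := by
        rw [Nat.div_lt_iff_lt_mul (by omega), mul_comm]
        simpa [Nat.factorial_succ] using hi
      rw [ih _ hi']
      -- the final step
      simp only [List.map_cons, List.map_nil, List.zip_cons_cons, List.zip_nil_right, List.foldl_cons, List.foldl_nil]
      have hrev : (xs ++ [x]).reverse = x :: xs.reverse := by simp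
      rw [hrev]
      have hb : pvBld (x :: xs.reverse) i
          = pvIns (pvPos (i / (xs.length + 1)) (i % (xs.length + 1)) (xs.length + 1)) x
              (pvBld xs.reverse (i / (xs.length + 1))) := by
        simp [pvBld]
      rw [hb]
      have hr : i % (xs.length + 1) < xs.length + 1 := Nat.mod_lt _ (by omega)
      have hlenb : (pvBld xs.reverse (i / (xs.length + 1))).length = xs.length := by
        rw [pvBld_len, List.length_reverse]
      have h2 : i / (xs.length + 1) * (xs.length + 1) + i % (xs.length + 1) = i := by
        rw [mul_comm]; exact Nat.div_add_mod i (xs.length + 1)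
      simp only [Prod.mk.injEq]
      refine ⟨?_, ?_, by push_cast; ring⟩
      · rw [pvModTwo]
        by_cases hq : i / (xs.length + 1) % 2 = 0
        · have hq1 : (i / (xs.length + 1) % 2 == 0) = true := by simp [hq]
          have hc : ((pvBld xs.reverse (i / (xs.length + 1))).length : Int)
              - ((i % (xs.length + 1) : Nat) : Int)
              = ((xs.length - i % (xs.length + 1) : Nat) : Int) := by
            rw [hlenb]; omega
          have hpos : pvPos (i / (xs.length + 1)) (i % (xs.length + 1)) (xs.length + 1)
              = xs.length - i % (xs.length + 1) := by
            unfold pvPos; simp [hq]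
          rw [hq1, if_pos rfl, hc, PySem.List.insert_natCast (pvBld xs.reverse (i / (xs.length + 1))) (xs.length - i % (xs.length + 1)) x (by rw [hlenb]; omega), hpos]
          rfl
        · have hq1 : (i / (xs.length + 1) % 2 == 0) = false := by
            simp only [beq_eq_false_iff_ne, ne_eq]; exact hq
          have hpos : pvPos (i / (xs.length + 1)) (i % (xs.length + 1)) (xs.length + 1)
              = i % (xs.length + 1) := by
            unfold pvPos; simp [hq]
          rw [hq1, if_neg (by simp)]
          rw [PySem.List.insert_natCast (pvBld xs.reverse (i / (xs.length + 1))) (i % (xs.length + 1)) x (by rw [hlenb]; omega), hpos]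
          rfl
      · have h3 : ((i / (xs.length + 1) * (xs.length + 1) + i % (xs.length + 1) : Nat) : Int)
            = (i : Int) := by exact_mod_cast congrArg (Nat.cast (R := Int)) h2
        push_cast at h3
        exact h3


lemma pvMainB (seq : List Int) (i : Nat) (hi : i < Nat.factorial seq.length) :
    pvBuild (seq.length : Int) seq (i : Int) = pvBld seq.reverse i := by
  simp only [pvBuild]
  rw [pvDigitsLoop seq.length i [], List.nil_append, ← List.map_reverse, List.reverse_reverse,
    pvZipLoop seq i hi]

lemma pvTotal (n : Nat) :
    (PySem.List.pyRange 2 ((n : Int) + 1) 1).foldl (fun t k => t * k) 1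
      = (Nat.factorial n : Int) := by
  induction n with
  | zero => rw [PySem.List.pyRange_one_eq_nil (by norm_num)]; rfl
  | succ n ih =>
      rcases Nat.eq_zero_or_pos n with h | h
      · subst h; rw [PySem.List.pyRange_one_eq_nil (by norm_num)]; rfl
      · have h2 : (2 : Int) ≤ (n : Int) + 1 := by omega
        push_cast
        rw [show ((n:Int) + 1 + 1) = ((n:Int)+1) + 1 by ring,
          PySem.List.pyRange_one_succ_right h2, List.foldl_append, ih]
        simp [Nat.factorial_succ]
        ring

-- ===== VERDICT (by name: the statement is the Claim_ definition above) =====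
theorem permutations_with_signs_spec : Claim_equal_permutations_with_signs := by
  intro seq _
  unfold Spec_permutations_with_signs
  simp only [permutations_with_signs, permutations_with_signs_alt]
  rw [pvMainA, pvEnumMapRange, pvTotal seq.length, PySem.List.pyRange_zero_natCast,
    List.map_map, List.map_map]
  apply List.map_congr_left
  intro k hk
  rw [List.mem_range] at hk
  simp only [Function.comp]
  rw [pvMainB seq k hk]
  simp [PySem.Int.mod_eq_emod_of_pos]
  split_ifs <;> omega
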